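-- pv_equiv track=rewrite | github.com/Qianqian-Tang/Foundations-of-Artificial-Intelligence | hw3/homework.py | convertVar
-- ===== SOURCE A (Python) =====
-- from collections import defaultdict
--
-- def convertVar(sentence, idx):
--     var = defaultdict(str)
--     for pred in sentence:
--         for i, obj in enumerate(pred[2:]):
--             if obj[0].islower():
--                 if var[obj] == '':
--                     var[obj] = 'v' + str(idx)
--                     pred[i+2] = var[obj]
--                     idx += 1
--                 else: pred[i+2] = var[obj]
--     return sentence, idx
-- ===== SOURCE B (Python) =====
-- def convertVar(sentence, idx):
--     mapping = {}
--     for pred in sentence: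
--         for obj in pred[2:]:
--             if obj[0].islower() and obj not in mapping:
--                 mapping[obj] = 'v' + str(idx)
--                 idx += 1
--     for pred in sentence:
--         for i, obj in enumerate(pred[2:]):
--             if obj[0].islower():
--                 pred[i + 2] = mapping[obj]
--     return sentence, idx
-- ===== Notes on version B (the rewrite author's own statement) =====
-- stated objective: alternative
-- what changed: A fuses renaming into a single pass that threads the variable table and counter through every predicate while rewriting it in place; B decomposes the job into two passes: pass 1 only builds the complete rename table in first-encounter order, pass 2 only applies it.
import Mathlib
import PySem

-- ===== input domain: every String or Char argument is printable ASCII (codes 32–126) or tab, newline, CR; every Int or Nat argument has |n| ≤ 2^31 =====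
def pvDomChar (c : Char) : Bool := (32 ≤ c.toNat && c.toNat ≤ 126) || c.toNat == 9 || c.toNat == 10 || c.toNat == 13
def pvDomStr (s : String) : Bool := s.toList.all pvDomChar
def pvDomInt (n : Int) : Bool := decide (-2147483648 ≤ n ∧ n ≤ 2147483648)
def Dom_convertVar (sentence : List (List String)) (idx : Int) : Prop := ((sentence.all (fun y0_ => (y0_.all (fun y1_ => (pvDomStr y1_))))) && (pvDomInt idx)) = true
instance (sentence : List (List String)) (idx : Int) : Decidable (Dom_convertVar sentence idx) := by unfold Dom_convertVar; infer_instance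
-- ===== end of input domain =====

-- B replaces A's single fused pass (rename table, counter and rewriting threaded together)
-- by two separate passes: build the whole table first, then apply it. Same cost; both Pythons
-- mutate the inner lists of `sentence` in place identically, the theorem is about the return value.

-- shared helpers: `obj[0].islower()` (none = IndexError on the empty string, excluded by Pre_)
-- and `'v' + str(idx)` (string concatenation written on the List Char side, kernel-reducible)
def pvFirstLower (obj : String) : Bool :=
  match PySem.Str.pyGet? obj 0 with
  | some c => PySem.Chars.islower c
  | none => false

def pvName (ix : Int) : String := String.ofList ('v' :: (PySem.Int.toStr ix).toList)

-- ===== PORT A =====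
-- A's inner-loop body. `var` is the defaultdict: `var[obj] == ''` is `getD obj ""`
-- (defaultdict's silent insertion of '' is unobservable: the dict is only ever read via
-- this default lookup and never iterated), `var[obj] = …` is `insert`, and the following
-- `pred[i+2] = var[obj]` re-reads the freshly inserted value.
def pvStepA (st : List String × PySem.Dict String String × Int) (p : Int × String) :
    List String × PySem.Dict String String × Int :=
  if pvFirstLower p.2 then
    if st.2.1.getD p.2 "" = "" then
      let v' := st.2.1.insert p.2 (pvName st.2.2)
      (PySem.List.pySetD st.1 (p.1 + 2) (v'.getD p.2 ""), v', st.2.2 + 1)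
    else
      (PySem.List.pySetD st.1 (p.1 + 2) (st.2.1.getD p.2 ""), st.2.1, st.2.2)
  else st

-- `for i, obj in enumerate(pred[2:]): …` with `pred` being rewritten in place
def pvProcPredA (pred : List String) (v : PySem.Dict String String) (ix : Int) :
    List String × PySem.Dict String String × Int :=
  (PySem.List.enumerate (PySem.List.slice pred (some 2) none) 0).foldl pvStepA (pred, v, ix)

def convertVar (sentence : List (List String)) (idx : Int) : List (List String) × Int :=
  let st := sentence.foldl
    (fun (acc : List (List String) × PySem.Dict String String × Int) pred =>
      let r := pvProcPredA pred acc.2.1 acc.2.2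
      (acc.1 ++ [r.1], r.2))
    ([], PySem.Dict.empty, idx)
  (st.1, st.2.2)

-- ===== PORT B =====
-- pass 1 body: `if obj[0].islower() and obj not in mapping: mapping[obj] = 'v'+str(idx); idx += 1`
def pvStepB (vi : PySem.Dict String String × Int) (obj : String) :
    PySem.Dict String String × Int :=
  if pvFirstLower obj && !(vi.1.contains obj) then (vi.1.insert obj (pvName vi.2), vi.2 + 1)
  else vi

def pvBuildPred (vi : PySem.Dict String String × Int) (pred : List String) :
    PySem.Dict String String × Int :=
  (PySem.List.slice pred (some 2) none).foldl pvStepB vi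

-- pass 2 on one pred: `pred[i+2] = mapping[obj]`; pass 1 put every lowercase obj into
-- mapping, so the Python lookup never raises and is ported as `getD … ""`
def pvApplyPred (v : PySem.Dict String String) (pred : List String) : List String :=
  (PySem.List.enumerate (PySem.List.slice pred (some 2) none) 0).foldl
    (fun pr p => if pvFirstLower p.2 then PySem.List.pySetD pr (p.1 + 2) (v.getD p.2 "") else pr)
    pred

def convertVar_alt (sentence : List (List String)) (idx : Int) : List (List String) × Int :=
  let vi := sentence.foldl pvBuildPred (PySem.Dict.empty, idx)
  (sentence.map (pvApplyPred vi.1), vi.2)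

-- ===== PRECONDITION & SPEC =====
-- Pre_ excludes exactly the inputs where the Python raises: an empty string among the
-- objects pred[2:], on which obj[0] is an IndexError (in A and in B alike).
def Pre_convertVar (sentence : List (List String)) (idx : Int) : Prop :=
  ∀ pred ∈ sentence, ∀ obj ∈ pred.drop 2, obj ≠ ""
instance (sentence : List (List String)) (idx : Int) : Decidable (Pre_convertVar sentence idx) := by unfold Pre_convertVar; infer_instance

def pvWitness_convertVar : List (List String) × Int :=
  ([["Parent", "T", "x", "Bob", "x"], ["Old", "F", "y"]], 3)

def Spec_convertVar (sentence : List (List String)) (idx : Int) (out : List (List String) × Int) : Prop := out = convertVar_alt sentence idx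
instance (sentence : List (List String)) (idx : Int) (out : List (List String) × Int) : Decidable (Spec_convertVar sentence idx out) := by unfold Spec_convertVar; infer_instance

-- ===== CLAIM (what is proved, stated in full; the proofs are below) =====
def Claim_equal_convertVar : Prop := ∀ (sentence : List (List String)) (idx : Int), Dom_convertVar sentence idx → Pre_convertVar sentence idx → Spec_convertVar sentence idx (convertVar sentence idx)

-- ===== LEMMAS AND PROOFS =====

-- `v ⊑ w`: every binding of v is a binding of w (the table only ever grows)
def pvSub (v w : PySem.Dict String String) : Prop :=
  ∀ k r, v.get? k = some r → w.get? k = some r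

-- invariant of A's defaultdict: no stored value is '' (all values are 'v'+str(_))
def pvInv (v : PySem.Dict String String) : Prop :=
  ∀ k r, v.get? k = some r → r ≠ ""

theorem pvName_ne_empty (ix : Int) : pvName ix ≠ "" := by
  intro h
  have := congrArg String.toList h
  simp [pvName] at this

theorem pvSub_trans {u v w : PySem.Dict String String} (h1 : pvSub u v) (h2 : pvSub v w) :
    pvSub u w := fun k r hk => h2 k r (h1 k r hk)

theorem pvInv_getD_empty_iff {v : PySem.Dict String String} (hInv : pvInv v) (k : String) :
    (v.getD k "" = "" ↔ v.contains k = false) := by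
  rw [PySem.Dict.getD_eq_get?_getD, PySem.Dict.contains_eq_isSome_get?]
  cases h : v.get? k with
  | none => simp
  | some r => simpa using hInv k r h

theorem pvSub_stepB (vi : PySem.Dict String String × Int) (obj : String) :
    pvSub vi.1 (pvStepB vi obj).1 := by
  unfold pvStepB
  split
  · rename_i hcond
    intro k r hk
    have hne : k ≠ obj := by
      intro h; subst h
      simp [PySem.Dict.contains_eq_isSome_get?, hk] at hcond
    simpa [PySem.Dict.get?_insert_of_ne _ _ hne] using hk
  · exact fun k r hk => hk

theorem pvInv_stepB {vi : PySem.Dict String String × Int} (hInv : pvInv vi.1) (obj : String) :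
    pvInv (pvStepB vi obj).1 := by
  unfold pvStepB
  split
  · intro k r hk
    by_cases hkk : k = obj
    · subst hkk
      rw [PySem.Dict.get?_insert_self] at hk
      cases hk
      exact pvName_ne_empty _
    · exact hInv k r (by rwa [PySem.Dict.get?_insert_of_ne _ _ hkk] at hk)
  · exact hInv

theorem pvSub_foldl_stepB (l : List String) (vi : PySem.Dict String String × Int) :
    pvSub vi.1 (l.foldl pvStepB vi).1 := by
  induction l generalizing vi with
  | nil => exact fun k r hk => hk
  | cons o t ih =>
      exact pvSub_trans (pvSub_stepB vi o) (ih (pvStepB vi o))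

theorem pvInv_foldl_stepB (l : List String) {vi : PySem.Dict String String × Int}
    (hInv : pvInv vi.1) : pvInv (l.foldl pvStepB vi).1 := by
  induction l generalizing vi with
  | nil => exact hInv
  | cons o t ih => exact ih (pvInv_stepB hInv o)

theorem pvSub_buildPred (pred : List String) (vi : PySem.Dict String String × Int) :
    pvSub vi.1 (pvBuildPred vi pred).1 := pvSub_foldl_stepB _ vi

theorem pvInv_buildPred (pred : List String) {vi : PySem.Dict String String × Int}
    (hInv : pvInv vi.1) : pvInv (pvBuildPred vi pred).1 := pvInv_foldl_stepB _ hInv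

theorem pvSub_foldl_buildPred (sent : List (List String)) (vi : PySem.Dict String String × Int) :
    pvSub vi.1 (sent.foldl pvBuildPred vi).1 := by
  induction sent generalizing vi with
  | nil => exact fun k r hk => hk
  | cons p t ih => exact pvSub_trans (pvSub_buildPred p vi) (ih (pvBuildPred vi p))

-- pvBuildPred as a fold over the SAME enumerated list A's fold runs over
theorem pvBuildPred_enum (vi : PySem.Dict String String × Int) (pred : List String) :
    pvBuildPred vi pred =
      (PySem.List.enumerate (PySem.List.slice pred (some 2) none) 0).foldl
        (fun vi p => pvStepB vi p.2) vi := by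
  unfold pvBuildPred
  conv_lhs => rw [← PySem.List.map_snd_enumerate (PySem.List.slice pred (some 2) none) 0]
  rw [List.foldl_map]

-- the fused inner loop of A = (pass-1 step fold, pass-2 rewrite fold against any
-- extension w of the table pass 1 produces)
theorem pvFusedL (l : List (Int × String)) (pr : List String)
    (v : PySem.Dict String String) (ix : Int) (w : PySem.Dict String String)
    (hInv : pvInv v)
    (hSub : pvSub (l.foldl (fun vi p => pvStepB vi p.2) (v, ix)).1 w) :
    l.foldl pvStepA (pr, v, ix) =
      (l.foldl (fun pr (p : Int × String) =>
          if pvFirstLower p.2 then PySem.List.pySetD pr (p.1 + 2) (w.getD p.2 "") else pr) pr,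
        l.foldl (fun vi p => pvStepB vi p.2) (v, ix)) := by
  induction l generalizing pr v ix with
  | nil => rfl
  | cons p t ih =>
      by_cases hL : pvFirstLower p.2
      · by_cases hc : v.contains p.2 = true
        · -- already mapped: A rewrites with the stored value, table unchanged
          obtain ⟨r, hr⟩ : ∃ r, v.get? p.2 = some r := by
            rw [PySem.Dict.contains_eq_isSome_get?] at hc
            exact Option.isSome_iff_exists.mp hc
          have hgD : v.getD p.2 "" = r := PySem.Dict.getD_of_get?_eq_some _ _ hr
          have hrne : r ≠ "" := hInv _ _ hr
          have hstepA : pvStepA (pr, v, ix) p =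
              (PySem.List.pySetD pr (p.1 + 2) r, v, ix) := by
            simp [pvStepA, hL, hgD, hrne]
          have hstepB : pvStepB (v, ix) p.2 = (v, ix) := by
            simp [pvStepB, hc]
          have hwr : w.getD p.2 "" = r := by
            have hsub1 : pvSub v (t.foldl (fun vi p => pvStepB vi p.2) (v, ix)).1 := by
              have := pvSub_foldl_stepB (t.map (·.2)) (v, ix)
              rwa [List.foldl_map] at this
            exact PySem.Dict.getD_of_get?_eq_some _ _ (hSub _ _ (by
              simpa [hstepB] using hsub1 _ _ hr))
          have hSub' : pvSub (t.foldl (fun vi p => pvStepB vi p.2) (v, ix)).1 w := by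
            simpa [hstepB] using hSub
          have hIf : (if pvFirstLower p.2 = true
              then PySem.List.pySetD pr (p.1 + 2) (w.getD p.2 "") else pr) =
              PySem.List.pySetD pr (p.1 + 2) r := by rw [if_pos hL, hwr]
          simp only [List.foldl_cons, hstepA, hstepB, hIf]
          exact ih _ v ix hInv hSub'
        · -- fresh: A assigns 'v'+str(ix) and rewrites with it
          have hc' : v.contains p.2 = false := by simpa using hc
          have hemp : v.getD p.2 "" = "" := (pvInv_getD_empty_iff hInv p.2).mpr hc'
          have hstepA : pvStepA (pr, v, ix) p =
              (PySem.List.pySetD pr (p.1 + 2) (pvName ix),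
                v.insert p.2 (pvName ix), ix + 1) := by
            simp [pvStepA, hL, hemp, PySem.Dict.getD_eq_get?_getD,
              PySem.Dict.get?_insert_self]
          have hstepB : pvStepB (v, ix) p.2 = (v.insert p.2 (pvName ix), ix + 1) := by
            simp [pvStepB, hL, hc']
          have hInv' : pvInv (v.insert p.2 (pvName ix)) := by
            have := pvInv_stepB (vi := (v, ix)) hInv p.2
            rwa [hstepB] at this
          have hSub' : pvSub (t.foldl (fun vi p => pvStepB vi p.2)
              (v.insert p.2 (pvName ix), ix + 1)).1 w := by
            simpa [hstepB] using hSub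
          have hwr : w.getD p.2 "" = pvName ix := by
            have hsub1 : pvSub (v.insert p.2 (pvName ix))
                (t.foldl (fun vi p => pvStepB vi p.2) (v.insert p.2 (pvName ix), ix + 1)).1 := by
              have := pvSub_foldl_stepB (t.map (·.2)) (v.insert p.2 (pvName ix), ix + 1)
              rwa [List.foldl_map] at this
            exact PySem.Dict.getD_of_get?_eq_some _ _
              (hSub' _ _ (hsub1 _ _ (PySem.Dict.get?_insert_self _ _ _)))
          have hIf : (if pvFirstLower p.2 = true
              then PySem.List.pySetD pr (p.1 + 2) (w.getD p.2 "") else pr) =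
              PySem.List.pySetD pr (p.1 + 2) (pvName ix) := by rw [if_pos hL, hwr]
          simp only [List.foldl_cons, hstepA, hstepB, hIf]
          exact ih _ _ _ hInv' hSub'
      · -- not lowercase: both sides skip
        have hstepA : pvStepA (pr, v, ix) p = (pr, v, ix) := by simp [pvStepA, hL]
        have hstepB : pvStepB (v, ix) p.2 = (v, ix) := by simp [pvStepB, hL]
        have hSub' : pvSub (t.foldl (fun vi p => pvStepB vi p.2) (v, ix)).1 w := by
          simpa [hstepB] using hSub
        have hIf : (if pvFirstLower p.2 = true
            then PySem.List.pySetD pr (p.1 + 2) (w.getD p.2 "") else pr) = pr := if_neg hL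
        simp only [List.foldl_cons, hstepA, hstepB, hIf]
        exact ih pr v ix hInv hSub'

-- one pred of A's fused pass = pass 1 on it + pass 2 against any extension of its table
theorem pvProcPredA_eq (pred : List String) (v : PySem.Dict String String) (ix : Int)
    (w : PySem.Dict String String) (hInv : pvInv v)
    (hSub : pvSub (pvBuildPred (v, ix) pred).1 w) :
    pvProcPredA pred v ix = (pvApplyPred w pred, pvBuildPred (v, ix) pred) := by
  unfold pvProcPredA pvApplyPred
  rw [pvBuildPred_enum] at hSub ⊢
  exact pvFusedL _ pred v ix w hInv hSub

-- A's outer fold against B's two passes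
theorem pvMain (sent : List (List String)) (acc : List (List String))
    (v : PySem.Dict String String) (ix : Int) (w : PySem.Dict String String)
    (hInv : pvInv v) (hSub : pvSub (sent.foldl pvBuildPred (v, ix)).1 w) :
    sent.foldl
      (fun (a : List (List String) × PySem.Dict String String × Int) pred =>
        let r := pvProcPredA pred a.2.1 a.2.2
        (a.1 ++ [r.1], r.2)) (acc, v, ix) =
      (acc ++ sent.map (pvApplyPred w), sent.foldl pvBuildPred (v, ix)) := by
  induction sent generalizing acc v ix with
  | nil => simp
  | cons pred t ih =>
      rcases hb : pvBuildPred (v, ix) pred with ⟨v1, i1⟩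
      have hfold : (pred :: t).foldl pvBuildPred (v, ix) = t.foldl pvBuildPred (v1, i1) := by
        simp [List.foldl_cons, hb]
      have hSubt : pvSub (t.foldl pvBuildPred (v1, i1)).1 w := by rwa [hfold] at hSub
      have hSub1 : pvSub v1 w := by
        have h1 : pvSub v1 (t.foldl pvBuildPred (v1, i1)).1 := pvSub_foldl_buildPred t (v1, i1)
        exact pvSub_trans h1 hSubt
      have hSubP : pvSub (pvBuildPred (v, ix) pred).1 w := by rw [hb]; exact hSub1
      have hInv1 : pvInv v1 := by
        have := pvInv_buildPred (vi := (v, ix)) pred hInv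
        rwa [hb] at this
      have hproc := pvProcPredA_eq pred v ix w hInv hSubP
      rw [hb] at hproc
      simp only [List.foldl_cons, hproc, hfold]
      rw [ih (acc ++ [pvApplyPred w pred]) v1 i1 hInv1 hSubt]
      simp

-- ===== VERDICT (by name: the statement is the Claim_ definition above) =====
theorem convertVar_spec : Claim_equal_convertVar := by
  intro sentence idx _hdom _hpre
  unfold Spec_convertVar convertVar convertVar_alt
  have hInv : pvInv (PySem.Dict.empty : PySem.Dict String String) := by
    intro k r hk
    simp [PySem.Dict.get?_empty] at hk
  have h := pvMain sentence [] PySem.Dict.empty idx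
    (sentence.foldl pvBuildPred (PySem.Dict.empty, idx)).1 hInv (fun k r hk => hk)
  simp only [h, List.nil_append]
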